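-- pv_equiv track=rewrite | github.com/biodiversitycellatlas/bca_preprocessing | bin/parsebio_custom_demux.py | best_matches_all
-- ===== SOURCE A (Python) =====
-- from typing import Dict, Iterable, Tuple, Optional, Set, List
--
-- def hamming(a: str, b: str) -> int:
--     """Return Hamming distance for equal-length strings, large int if lengths differ."""
--     if len(a) != len(b): return 10**9
--     return sum(x != y for x, y in zip(a, b))
--
-- def best_matches_all(bc: str, wl_seqs: Iterable[str], max_ed: int = 2) -> Tuple[List[str], Optional[int]]:
--     """
--     Return (list_of_best_seqs, best_distance) where list_of_best_seqs are
--     all whitelist sequences at the minimal Hamming distance ≤ max_ed.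
--     If no match within max_ed, returns ([], None).
--     """
--     bc = bc.upper()
--     best_d = None
--     best_list: List[str] = []
--     for w in wl_seqs:
--         d = hamming(bc, w)
--         if best_d is None or d < best_d:
--             best_d = d
--             best_list = [w]
--         elif d == best_d:
--             best_list.append(w)
--     if best_d is None or best_d > max_ed:
--         return [], None
--     return best_list, best_d
-- ===== SOURCE B (Python) =====
-- def hamming(a: str, b: str) -> int:
--     if len(a) != len(b): return 10**9
--     return sum(x != y for x, y in zip(a, b))
--
-- def best_matches_all(bc, wl_seqs, max_ed=2):
--     bc = bc.upper()
--     wl = list(wl_seqs)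
--     dists = [hamming(bc, w) for w in wl]
--     if not dists:
--         return [], None
--     best_d = min(dists)
--     if best_d > max_ed:
--         return [], None
--     return [w for w, d in zip(wl, dists) if d == best_d], best_d
-- ===== Notes on version B (the rewrite author's own statement) =====
-- stated objective: simpler
-- what changed: Replaces A's fused running-min loop with fallible None state and in-loop list reset/append by a plain three-step decomposition: map to distances, take min, filter the ties.
import Mathlib
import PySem

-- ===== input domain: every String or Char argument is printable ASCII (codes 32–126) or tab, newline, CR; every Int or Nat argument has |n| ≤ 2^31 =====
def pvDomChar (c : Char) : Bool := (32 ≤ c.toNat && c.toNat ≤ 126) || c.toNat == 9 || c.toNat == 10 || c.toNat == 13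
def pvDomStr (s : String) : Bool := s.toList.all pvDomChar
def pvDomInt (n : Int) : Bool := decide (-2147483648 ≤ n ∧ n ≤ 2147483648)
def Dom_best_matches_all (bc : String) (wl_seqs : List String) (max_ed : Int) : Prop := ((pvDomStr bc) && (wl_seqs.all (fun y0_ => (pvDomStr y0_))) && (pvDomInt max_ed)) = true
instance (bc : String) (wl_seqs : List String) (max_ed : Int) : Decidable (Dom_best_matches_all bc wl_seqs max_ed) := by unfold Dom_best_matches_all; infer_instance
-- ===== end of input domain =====

-- B replaces A's fused running-min loop (Option state, reset/append) with a plain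
-- map-distances / min / filter-ties decomposition; objective: simpler. Total on all inputs.

-- ===== PORT A =====
-- hamming helper, shared module-level helper of both Pythons
def pyHamming (a b : String) : Int :=
  if a.toList.length ≠ b.toList.length then 10 ^ 9
  else (a.toList.zip b.toList).foldl (fun s p => s + (if p.1 ≠ p.2 then 1 else 0)) 0

def best_matches_all (bc : String) (wl_seqs : List String) (max_ed : Int) : List String × Option Int :=
  let bcU := PySem.Str.upper bc
  let st := wl_seqs.foldl
    (fun (st : Option Int × List String) w =>
      let d := pyHamming bcU w
      match st.1 with
      | none => (some d, [w])
      | some bd =>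
        if d < bd then (some d, [w])
        else if d = bd then (some bd, st.2 ++ [w])
        else st)
    (none, [])
  match st.1 with
  | none => ([], none)
  | some bd => if bd > max_ed then ([], none) else (st.2, some bd)

-- ===== PORT B =====
def best_matches_all_alt (bc : String) (wl_seqs : List String) (max_ed : Int) : List String × Option Int :=
  let bcU := PySem.Str.upper bc
  let dists := wl_seqs.map (fun w => pyHamming bcU w)
  match PySem.List.min? dists (fun x => x) with
  | none => ([], none)
  | some m =>
    if m > max_ed then ([], none)
    else (((wl_seqs.zip dists).filter (fun p => p.2 == m)).map (fun p => p.1), some m)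

-- ===== PRECONDITION & SPEC =====
def Spec_best_matches_all (bc : String) (wl_seqs : List String) (max_ed : Int) (out : List String × Option Int) : Prop := out = best_matches_all_alt bc wl_seqs max_ed
instance (bc : String) (wl_seqs : List String) (max_ed : Int) (out : List String × Option Int) : Decidable (Spec_best_matches_all bc wl_seqs max_ed out) := by unfold Spec_best_matches_all; infer_instance

-- ===== CLAIM (what is proved, stated in full; the proofs are below) =====
def Claim_equal_best_matches_all : Prop := ∀ (bc : String) (wl_seqs : List String) (max_ed : Int), Dom_best_matches_all bc wl_seqs max_ed → Spec_best_matches_all bc wl_seqs max_ed (best_matches_all bc wl_seqs max_ed)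

-- ===== LEMMAS AND PROOFS =====

-- A's loop on a `some` state computes the running min and the ties with it
theorem loopA_char (h : String → Int) (l : List String) (bd : Int) (acc : List String) :
    l.foldl
      (fun (st : Option Int × List String) w =>
        let d := h w
        match st.1 with
        | none => (some d, [w])
        | some b =>
          if d < b then (some d, [w])
          else if d = b then (some b, st.2 ++ [w])
          else st)
      (some bd, acc)
    = (some (l.foldl (fun b w => min b (h w)) bd),
       (if l.foldl (fun b w => min b (h w)) bd = bd then acc else [])
         ++ l.filter (fun w => h w == l.foldl (fun b w => min b (h w)) bd)) := by
  induction l generalizing bd acc with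
  | nil => simp
  | cons w t ih =>
    have hmle := (PySem.List.foldl_min_le (t.map h) (min bd (h w))).1
    rw [List.foldl_map] at hmle
    simp only [List.foldl_cons, List.filter_cons]
    rcases lt_trichotomy (h w) bd with hlt | heq | hgt
    · have h1 : min bd (h w) = h w := by omega
      rw [h1] at hmle
      simp only [if_pos hlt, ih, h1]
      have hne : t.foldl (fun b w => min b (h w)) (h w) ≠ bd := by omega
      rw [if_neg hne]
      by_cases hwm : t.foldl (fun b w => min b (h w)) (h w) = h w
      · rw [if_pos hwm, if_pos (show (h w == t.foldl (fun b w => min b (h w)) (h w)) = true by simp [hwm])]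
        simp
      · rw [if_neg hwm,
          if_neg (show ¬ (h w == t.foldl (fun b w => min b (h w)) (h w)) = true by
            simp; exact fun e => hwm e.symm)]
    · have h1 : min bd (h w) = bd := by omega
      rw [h1] at hmle
      simp only [if_neg (show ¬ h w < bd by omega), if_pos heq, ih, h1]
      by_cases hm : t.foldl (fun b w => min b (h w)) bd = bd
      · rw [if_pos hm, if_pos hm,
          if_pos (show (h w == t.foldl (fun b w => min b (h w)) bd) = true by simp [heq, hm])]
        simp
      · rw [if_neg hm, if_neg hm,
          if_neg (show ¬ (h w == t.foldl (fun b w => min b (h w)) bd) = true by simp; omega)]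
    · have h1 : min bd (h w) = bd := by omega
      rw [h1] at hmle
      simp only [if_neg (show ¬ h w < bd by omega), if_neg (show ¬ h w = bd by omega), ih, h1]
      rw [if_neg (show ¬ (h w == t.foldl (fun b w => min b (h w)) bd) = true by simp; omega)]

-- filter through zip with the map of distances = direct filter
theorem zip_map_filter (h : String → Int) (l : List String) (m : Int) :
    ((l.zip (l.map h)).filter (fun p => p.2 == m)).map (fun p => p.1)
      = l.filter (fun w => h w == m) := by
  induction l with
  | nil => rfl
  | cons w t ih =>
    simp only [List.map_cons, List.zip_cons_cons, List.filter_cons]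
    by_cases hw : h w == m
    · simp [hw, ih]
    · simp [hw, ih]

-- ===== VERDICT (by name: the statement is the Claim_ definition above) =====
theorem best_matches_all_spec : Claim_equal_best_matches_all := by
  intro bc wl max_ed _
  unfold Spec_best_matches_all best_matches_all best_matches_all_alt
  cases wl with
  | nil => rfl
  | cons w t =>
    simp only [List.foldl_cons, List.map_cons]
    rw [loopA_char]
    rw [PySem.List.min?_id_cons, List.foldl_map]
    set h := fun w' => pyHamming (PySem.Str.upper bc) w' with hh
    set m := t.foldl (fun b w' => min b (h w')) (h w) with hm
    have hmle := (PySem.List.foldl_min_le (t.map h) (h w)).1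
    rw [List.foldl_map] at hmle
    by_cases hgt : m > max_ed
    · simp [hgt]
    · simp only [if_neg hgt]
      rw [show pyHamming (PySem.Str.upper bc) w :: List.map h t = (w :: t).map h from rfl,
        zip_map_filter]
      simp only [Prod.mk.injEq, List.filter_cons]
      refine ⟨?_, trivial⟩
      split_ifs with hc hd hd
      · rfl
      · exact absurd (show (h w == m) = true by simp; exact hc.symm) hd
      · exact absurd (show h w = m by simpa using hd) (fun e => hc e.symm)
      · rfl
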